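-- pv_equiv track=rewrite | github.com/18-12847/KT_AIVLE_SCHOOL_Study_Backup | Python Programming/2day/실습/Chapter2/부품 찾기.py | solution
-- ===== SOURCE A (Python) =====
-- def solution(store, customer):
--     ans = []
--     for i in customer:
--         if i in store:
--             ans.append("yes")
--         else:
--             ans.append("no")
--     return ans
-- ===== SOURCE B (Python) =====
-- def solution(store, customer):
--     # Sort once, then binary-search each customer item (sorted copy: no mutation).
--     s = sorted(store)
--     n = len(s)
--     ans = []
--     for i in customer:
--         lo, hi = 0, n
--         while lo < hi:
--             mid = (lo + hi) // 2
--             if s[mid] < i: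
--                 lo = mid + 1
--             else:
--                 hi = mid
--         ans.append("yes" if lo < n and s[lo] == i else "no")
--     return ans
-- ===== Notes on version B (the rewrite author's own statement) =====
-- stated objective: faster
-- what changed: Replaces A's per-item linear scan of store with sorting store once and running a hand-rolled binary search for each customer item.
import Mathlib
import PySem

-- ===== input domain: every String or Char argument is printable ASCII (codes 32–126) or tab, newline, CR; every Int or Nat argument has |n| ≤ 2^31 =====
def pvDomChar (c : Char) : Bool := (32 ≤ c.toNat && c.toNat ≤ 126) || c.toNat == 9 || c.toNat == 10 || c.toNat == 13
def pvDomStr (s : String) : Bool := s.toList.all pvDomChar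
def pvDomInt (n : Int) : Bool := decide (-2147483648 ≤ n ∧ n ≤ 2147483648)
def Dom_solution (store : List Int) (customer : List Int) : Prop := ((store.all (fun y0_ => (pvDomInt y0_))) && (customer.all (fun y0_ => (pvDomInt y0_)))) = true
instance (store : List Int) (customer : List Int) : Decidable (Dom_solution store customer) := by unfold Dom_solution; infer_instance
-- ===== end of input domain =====

-- B sorts the store once and binary-searches each customer item instead of A's per-item linear scan (faster in a timing run's mechanism: asymptotic).


-- ===== PORT A =====
def solution (store : List Int) (customer : List Int) : List String :=
  customer.foldl (fun ans i => ans ++ [if store.contains i then "yes" else "no"]) []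

-- ===== PORT B =====
-- the `while lo < hi` loop of Source B, step for step (recursion on hi - lo); s[mid] is in range at every call
def bsearch (s : List Int) (i : Int) (lo hi : Nat) : Nat :=
  if lo < hi then
    let mid := (lo + hi) / 2
    if s.getD mid 0 < i then bsearch s i (mid + 1) hi else bsearch s i lo mid
  else lo
termination_by hi - lo
decreasing_by all_goals omega

def solution_alt (store : List Int) (customer : List Int) : List String :=
  let s := PySem.List.sorted store (fun x => x) false
  let n := s.length
  customer.foldl (fun ans i =>
    let lo := bsearch s i 0 n
    ans ++ [if lo < n ∧ s.getD lo 0 = i then "yes" else "no"]) []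

-- ===== PRECONDITION & SPEC =====
def Spec_solution (store : List Int) (customer : List Int) (out : List String) : Prop := out = solution_alt store customer
instance (store : List Int) (customer : List Int) (out : List String) : Decidable (Spec_solution store customer out) := by unfold Spec_solution; infer_instance

-- ===== CLAIM (what is proved, stated in full; the proofs are below) =====
def Claim_equal_solution : Prop := ∀ (store : List Int) (customer : List Int), Dom_solution store customer → Spec_solution store customer (solution store customer)

-- ===== LEMMAS AND PROOFS =====

theorem sorted_getD_mono (s : List Int) (hs : s.Pairwise (· ≤ ·)) (p q : Nat)
    (hpq : p ≤ q) (hq : q < s.length) : s.getD p 0 ≤ s.getD q 0 := by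
  rcases Nat.lt_or_ge p q with h | h
  · rw [List.getD_eq_getElem s 0 (by omega), List.getD_eq_getElem s 0 hq]
    exact List.pairwise_iff_getElem.mp hs p q (by omega) hq h
  · have : p = q := by omega
    subst this; exact le_refl _

theorem bsearch_sorted (s : List Int) (hs : s.Pairwise (· ≤ ·)) (i : Int) (lo hi : Nat)
    (hlo : lo ≤ hi) (hhi : hi ≤ s.length)
    (hbelow : ∀ j, j < lo → s.getD j 0 < i)
    (habove : ∀ j, hi ≤ j → j < s.length → i ≤ s.getD j 0) :
    (∀ j, j < bsearch s i lo hi → s.getD j 0 < i) ∧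
    (∀ j, bsearch s i lo hi ≤ j → j < s.length → i ≤ s.getD j 0) := by
  induction lo, hi using bsearch.induct s i with
  | case1 lo hi hlt mid hy ih =>
      rw [bsearch, if_pos hlt]
      show (∀ j, j < (if s.getD mid 0 < i then bsearch s i (mid + 1) hi else bsearch s i lo mid) → _) ∧ _
      rw [if_pos hy]
      refine ih (by omega) hhi (fun j hj => ?_) habove
      exact lt_of_le_of_lt (sorted_getD_mono s hs j mid (by omega) (by omega)) hy
  | case2 lo hi hlt mid hy ih =>
      rw [bsearch, if_pos hlt]
      show (∀ j, j < (if s.getD mid 0 < i then bsearch s i (mid + 1) hi else bsearch s i lo mid) → _) ∧ _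
      rw [if_neg hy]
      refine ih (by omega) (by omega) hbelow (fun j hj hjl => ?_)
      exact le_trans (not_lt.mp hy) (sorted_getD_mono s hs mid j hj hjl)
  | case3 lo hi hlt =>
      rw [bsearch, if_neg hlt]
      exact ⟨fun j hj => hbelow j hj, fun j hj1 hj2 => habove j (by omega) hj2⟩

theorem bsearch_mem_iff (s : List Int) (hs : s.Pairwise (· ≤ ·)) (i : Int) :
    ((bsearch s i 0 s.length < s.length ∧ s.getD (bsearch s i 0 s.length) 0 = i) ↔ i ∈ s) := by
  obtain ⟨h1, h2⟩ := bsearch_sorted s hs i 0 s.length (Nat.zero_le _) (le_refl _)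
    (fun j hj => absurd hj (Nat.not_lt_zero j)) (fun j hj1 hj2 => absurd (lt_of_le_of_lt hj1 hj2) (lt_irrefl _))
  set r := bsearch s i 0 s.length with hr
  constructor
  · rintro ⟨hrl, hre⟩
    rw [List.getD_eq_getElem s 0 hrl] at hre
    exact hre ▸ List.getElem_mem hrl
  · intro hmem
    obtain ⟨j, hj, hje⟩ := List.mem_iff_getElem.mp hmem
    have hjr : r ≤ j := by
      by_contra hc
      have := h1 j (by omega)
      rw [List.getD_eq_getElem s 0 hj, hje] at this
      exact lt_irrefl i this
    have hrl : r < s.length := lt_of_le_of_lt hjr hj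
    refine ⟨hrl, le_antisymm ?_ (h2 r (le_refl _) hrl)⟩
    calc s.getD r 0 ≤ s.getD j 0 := sorted_getD_mono s hs r j hjr hj
      _ = i := by rw [List.getD_eq_getElem s 0 hj, hje]

-- ===== VERDICT (by name: the statement is the Claim_ definition above) =====
theorem solution_spec : Claim_equal_solution := by
  intro store customer _
  unfold Spec_solution solution solution_alt
  simp only [PySem.List.foldl_append_singleton_eq_map, List.nil_append]
  refine List.map_congr_left (fun i _ => ?_)
  have hmem : store.contains i = true ↔
      (bsearch (PySem.List.sorted store (fun x => x) false) i 0
          (PySem.List.sorted store (fun x => x) false).length <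
        (PySem.List.sorted store (fun x => x) false).length ∧
       (PySem.List.sorted store (fun x => x) false).getD
          (bsearch (PySem.List.sorted store (fun x => x) false) i 0
            (PySem.List.sorted store (fun x => x) false).length) 0 = i) := by
    rw [List.contains_iff_mem,
      bsearch_mem_iff _ (PySem.List.sorted_pairwise store (fun x => x)) i,
      PySem.List.mem_sorted]
  by_cases h : store.contains i = true
  · rw [if_pos h, if_pos (hmem.mp h)]
  · rw [if_neg h, if_neg (fun hc => h (hmem.mpr hc))]
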